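-- pv_equiv track=rewrite | github.com/thisAbdU/A2SV-contest-Exercises | C_Expensive_Phone.py | expensive_phone
-- ===== SOURCE A (Python) =====
-- from collections import deque
--
-- def expensive_phone(n, arr):
--     stack_main = deque()
--     count = 0
--     for i in range(n):
--         while stack_main and arr[i] < stack_main[-1]:
--             stack_main.pop()
--             count += 1
--         else:
--             stack_main.append(arr[i])
--     return count
-- ===== SOURCE B (Python) =====
-- def expensive_phone(n, arr):
--     # Reverse suffix-minimum pass: an element survives (is never popped in the
--     # stack formulation) iff it is <= the minimum of the elements to its right.
--     total = 0
--     survivors = 0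
--     running_min = None
--     for i in range(n - 1, -1, -1):
--         v = arr[i]
--         total += 1
--         if running_min is None or v <= running_min:
--             survivors += 1
--         if running_min is None or v < running_min:
--             running_min = v
--     return total - survivors
-- ===== Notes on version B (the rewrite author's own statement) =====
-- stated objective: alternative
-- what changed: Replaced the forward monotonic-stack pop-counting loop with a single reverse pass keeping a running suffix minimum: count the survivors (elements <= the minimum to their right) and return iterations minus survivors; no stack is maintained.
import Mathlib
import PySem

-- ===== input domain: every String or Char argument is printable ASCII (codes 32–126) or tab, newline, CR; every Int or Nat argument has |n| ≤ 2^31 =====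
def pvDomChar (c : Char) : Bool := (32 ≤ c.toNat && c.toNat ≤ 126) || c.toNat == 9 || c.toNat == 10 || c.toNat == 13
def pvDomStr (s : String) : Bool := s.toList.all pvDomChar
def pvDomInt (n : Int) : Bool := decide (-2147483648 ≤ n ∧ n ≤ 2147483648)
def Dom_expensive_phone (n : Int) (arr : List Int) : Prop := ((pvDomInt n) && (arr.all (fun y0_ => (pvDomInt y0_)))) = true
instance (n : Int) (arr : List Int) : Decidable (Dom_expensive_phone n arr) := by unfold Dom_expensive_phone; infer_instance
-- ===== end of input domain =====

-- B replaces A's monotonic-stack pop counter by a reverse suffix-minimum pass (alternative algorithm, same cost).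

-- ===== PORT A =====
-- the inner 'while stack_main and arr[i] < stack_main[-1]: pop; count += 1' loop
-- (stack head = Python deque's right end / top)
def pvPopA (x : Int) : List Int → Int → List Int × Int
  | [], c => ([], c)
  | t :: rest, c => if x < t then pvPopA x rest (c + 1) else (t :: rest, c)

def pvStepA (s : List Int × Int) (x : Int) : List Int × Int :=
  let r := pvPopA x s.1 s.2
  (x :: r.1, r.2)   -- the 'else: stack_main.append(arr[i])' (always runs)

def expensive_phone (n : Int) (arr : List Int) : Int :=
  ((PySem.List.pyRange 0 n 1).foldl
    (fun s i => pvStepA s (PySem.List.pyGetD arr i 0)) ([], 0)).2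

-- ===== PORT B =====
-- state = (total, survivors, running_min); running_min = none ↔ Python's None
def pvStepB (s : Int × Int × Option Int) (v : Int) : Int × Int × Option Int :=
  (s.1 + 1,
   (match s.2.2 with
    | none => s.2.1 + 1
    | some m => if v ≤ m then s.2.1 + 1 else s.2.1),
   (match s.2.2 with
    | none => some v
    | some m => if v < m then some v else some m))

def expensive_phone_alt (n : Int) (arr : List Int) : Int :=
  let s := (PySem.List.pyRange (n - 1) (-1) (-1)).foldl
    (fun s i => pvStepB s (PySem.List.pyGetD arr i 0)) (0, 0, none)
  s.1 - s.2.1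

-- ===== PRECONDITION & SPEC =====
-- Pre_ excludes exactly n > len(arr), where A (and B) raise IndexError.
def Pre_expensive_phone (n : Int) (arr : List Int) : Prop := n ≤ (arr.length : Int)
instance (n : Int) (arr : List Int) : Decidable (Pre_expensive_phone n arr) := by
  unfold Pre_expensive_phone; infer_instance

def pvWitness_expensive_phone : Int × List Int := (3, [3, 1, 2])

def Spec_expensive_phone (n : Int) (arr : List Int) (out : Int) : Prop := out = expensive_phone_alt n arr
instance (n : Int) (arr : List Int) (out : Int) : Decidable (Spec_expensive_phone n arr out) := by unfold Spec_expensive_phone; infer_instance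

-- ===== CLAIM (what is proved, stated in full; the proofs are below) =====
def Claim_equal_expensive_phone : Prop := ∀ (n : Int) (arr : List Int), Dom_expensive_phone n arr → Pre_expensive_phone n arr → Spec_expensive_phone n arr (expensive_phone n arr)

-- ===== LEMMAS AND PROOFS =====

-- minimum update, as B performs it
def pvOmin (x : Int) : Option Int → Int
  | none => x
  | some m => if x < m then x else m

-- reference: survivors of xs (stack order, head = latest) together with min xs
def pvSurv : List Int → List Int × Option Int
  | [] => ([], none)
  | y :: ys =>
    let s := pvSurv ys
    ((match s.2 with
      | none => s.1 ++ [y]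
      | some m => if y ≤ m then s.1 ++ [y] else s.1),
     some (pvOmin y s.2))

def pvP (x : Int) : Int → Bool := fun t => decide (x < t)

lemma pvPopA_fst (x : Int) : ∀ (st : List Int) (c : Int),
    (pvPopA x st c).1 = st.dropWhile (pvP x) := by
  intro st
  induction st with
  | nil => intro c; simp [pvPopA]
  | cons t rest ih =>
    intro c
    by_cases h : x < t <;> simp [pvPopA, pvP, h, List.dropWhile_cons, ih]

lemma pvPopA_len (x : Int) : ∀ (st : List Int) (c : Int),
    (pvPopA x st c).2 + ((pvPopA x st c).1.length : Int) = c + st.length := by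
  intro st
  induction st with
  | nil => intro c; simp [pvPopA]
  | cons t rest ih =>
    intro c
    by_cases h : x < t
    · simp only [pvPopA, if_pos h]
      have := ih (c + 1)
      simp only [List.length_cons] at this ⊢
      push_cast at this ⊢
      omega
    · simp [pvPopA, if_neg h]

lemma foldlA_count : ∀ (xs : List Int) (st : List Int) (c : Int),
    (xs.foldl pvStepA (st, c)).2 + ((xs.foldl pvStepA (st, c)).1.length : Int)
      = c + st.length + xs.length := by
  intro xs
  induction xs with
  | nil => intro st c; simp
  | cons x xs ih =>
    intro st c
    have hx := pvPopA_len x st c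
    simp only [List.foldl_cons]
    have : pvStepA (st, c) x = ((x :: (pvPopA x st c).1), (pvPopA x st c).2) := rfl
    rw [this, ih]
    simp at hx ⊢
    omega

lemma pvSurv_lb : ∀ (ys : List Int) (m : Int), (pvSurv ys).2 = some m →
    (∀ t ∈ (pvSurv ys).1, m ≤ t) := by
  intro ys
  induction ys with
  | nil => intro m h; simp [pvSurv] at h
  | cons y ys ih =>
    intro m h t ht
    simp only [pvSurv] at h ht
    cases hm : (pvSurv ys).2 with
    | none =>
      have hnil : (pvSurv ys).1 = [] := by
        cases ys with
        | nil => simp [pvSurv]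
        | cons z zs => simp [pvSurv] at hm
      rw [hm] at h ht
      simp [pvOmin, hnil] at h ht
      omega
    | some m0 =>
      rw [hm] at h ht
      simp only [pvOmin] at h
      have hmle : m ≤ m0 ∧ m ≤ y := by
        by_cases hy : y < m0 <;> simp [hy] at h <;> omega
      by_cases hy2 : y ≤ m0
      · simp [hy2] at ht
        rcases ht with ht | ht
        · exact le_trans hmle.1 (ih m0 hm t ht)
        · omega
      · simp [hy2] at ht
        exact le_trans hmle.1 (ih m0 hm t ht)

lemma pvSurv_none : ∀ (ys : List Int), (pvSurv ys).2 = none → ys = [] := by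
  intro ys h
  cases ys with
  | nil => rfl
  | cons z zs => simp [pvSurv] at h

lemma pvOmin_comm (x y : Int) (mo : Option Int) :
    pvOmin y (some (pvOmin x mo)) = pvOmin x (some (pvOmin y mo)) := by
  cases mo <;> simp [pvOmin] <;> split_ifs <;> omega

lemma dropWhile_append_singleton_neg {p : Int → Bool} {y : Int} (hy : p y = false) :
    ∀ (L : List Int), (L ++ [y]).dropWhile p = L.dropWhile p ++ [y] := by
  intro L
  induction L with
  | nil => simp [List.dropWhile, hy]
  | cons a L ih =>
    by_cases ha : p a <;> simp [List.dropWhile_cons, ha, ih]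

lemma pvSurv_append_snd : ∀ (xs : List Int) (x : Int),
    (pvSurv (xs ++ [x])).2 = some (pvOmin x (pvSurv xs).2) := by
  intro xs
  induction xs with
  | nil => intro x; simp [pvSurv, pvOmin]
  | cons y t ih =>
    intro x
    have h1 : (pvSurv ((y :: t) ++ [x])).2 = some (pvOmin y (pvSurv (t ++ [x])).2) := rfl
    rw [h1, ih x, pvOmin_comm]
    rfl

lemma pvSurv_append_fst : ∀ (xs : List Int) (x : Int),
    (pvSurv (xs ++ [x])).1 = x :: (pvSurv xs).1.dropWhile (pvP x) := by
  intro xs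
  induction xs with
  | nil => intro x; simp [pvSurv]
  | cons y t ih =>
    intro x
    have h1 : (pvSurv ((y :: t) ++ [x])).1
        = (match (pvSurv (t ++ [x])).2 with
           | none => (pvSurv (t ++ [x])).1 ++ [y]
           | some m => if y ≤ m then (pvSurv (t ++ [x])).1 ++ [y] else (pvSurv (t ++ [x])).1) := rfl
    have h2 : (pvSurv (y :: t)).1
        = (match (pvSurv t).2 with
           | none => (pvSurv t).1 ++ [y]
           | some m => if y ≤ m then (pvSurv t).1 ++ [y] else (pvSurv t).1) := rfl
    rw [h1, pvSurv_append_snd t x, ih x, h2]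
    cases hmo : (pvSurv t).2 with
    | none =>
      have ht : t = [] := pvSurv_none t hmo
      subst ht
      simp only [pvSurv] at hmo ⊢
      by_cases hyx : y ≤ x
      · have hpy : pvP x y = false := by simp [pvP]; omega
        simp [pvOmin, hyx, hpy, List.dropWhile]
      · have hxy : x < y := by omega
        have hpy : pvP x y = true := by simp [pvP]; omega
        have hc : ¬ y ≤ pvOmin x none := by simp [pvOmin]; omega
        simp [pvOmin, hc, List.dropWhile, hpy]
        omega
    | some mv0 =>
      by_cases hyx : y ≤ pvOmin x (some mv0)
      · have hy1 : y ≤ mv0 := by simp only [pvOmin] at hyx; split_ifs at hyx <;> omega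
        have hy2 : y ≤ x := by simp only [pvOmin] at hyx; split_ifs at hyx <;> omega
        have hpy : pvP x y = false := by simp [pvP]; omega
        simp [hyx, hy1, dropWhile_append_singleton_neg hpy]
      · by_cases hy1 : y ≤ mv0
        · have hxy : x < y := by simp only [pvOmin] at hyx; split_ifs at hyx <;> omega
          have hall : ∀ t' ∈ (pvSurv t).1, x < t' := by
            intro t' ht'
            have := pvSurv_lb t mv0 hmo t' ht'
            omega
          have hD : (pvSurv t).1.dropWhile (pvP x) = [] := by
            rw [List.dropWhile_eq_nil_iff]
            intro t' ht'; simp only [pvP, decide_eq_true_eq]; exact hall t' ht'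
          have hD2 : ((pvSurv t).1 ++ [y]).dropWhile (pvP x) = [] := by
            rw [List.dropWhile_eq_nil_iff]
            intro t' ht'
            simp only [List.mem_append, List.mem_singleton] at ht'
            rcases ht' with ht' | ht'
            · simp only [pvP, decide_eq_true_eq]; exact hall t' ht'
            · subst ht'; simp only [pvP, decide_eq_true_eq]; omega
          simp [hyx, hy1, hD, hD2]
        · simp [hyx, hy1]

lemma pvSurv_append (xs : List Int) (x : Int) :
    pvSurv (xs ++ [x]) =
      (x :: (pvSurv xs).1.dropWhile (pvP x), some (pvOmin x (pvSurv xs).2)) := by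
  have h1 := pvSurv_append_fst xs x
  have h2 := pvSurv_append_snd xs x
  exact Prod.ext h1 h2

lemma stackA_eq : ∀ (xs : List Int),
    (xs.foldl pvStepA ([], 0)).1 = (pvSurv xs).1 := by
  intro xs
  induction xs using List.reverseRecOn with
  | nil => simp [pvSurv]
  | append_singleton xs x ih =>
    rw [List.foldl_append, pvSurv_append]
    simp only [List.foldl_cons, List.foldl_nil]
    have : pvStepA (xs.foldl pvStepA ([], 0)) x
        = (x :: (pvPopA x (xs.foldl pvStepA ([], 0)).1 (xs.foldl pvStepA ([], 0)).2).1,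
           (pvPopA x (xs.foldl pvStepA ([], 0)).1 (xs.foldl pvStepA ([], 0)).2).2) := rfl
    rw [this]
    simp [pvPopA_fst, ih]

lemma foldrB_eq : ∀ (xs : List Int),
    xs.foldr (fun v s => pvStepB s v) (0, 0, none)
      = ((xs.length : Int), ((pvSurv xs).1.length : Int), (pvSurv xs).2) := by
  intro xs
  induction xs with
  | nil => simp [pvSurv]
  | cons y ys ih =>
    simp only [List.foldr_cons, ih, pvSurv]
    cases hm : (pvSurv ys).2 with
    | none => simp [pvStepB, pvOmin, hm]
    | some m =>
      by_cases hy : y ≤ m <;> by_cases hy2 : y < m <;>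
        simp [pvStepB, pvOmin, hm, hy, hy2, Prod.ext_iff] <;> push_cast <;> omega

lemma foldlR1 {σ : Type} (arr : List Int) (F : σ → Int → σ) :
    ∀ (m : Nat), m ≤ arr.length → ∀ (init : σ),
    (PySem.List.pyRange 0 (m : Int) 1).foldl (fun s i => F s (PySem.List.pyGetD arr i 0)) init
      = (arr.take m).foldl F init := by
  intro m
  induction m with
  | zero =>
    intro _ init
    rw [show ((0 : Nat) : Int) = 0 from rfl, PySem.List.pyRange_one_eq_nil le_rfl]
    simp
  | succ k ih =>
    intro hm init
    have hk : (k : Int) ≥ 0 := by positivity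
    have : ((k + 1 : Nat) : Int) = (k : Int) + 1 := by push_cast; ring
    rw [this, PySem.List.pyRange_one_succ_right (by omega), List.foldl_append,
        ih (by omega)]
    have hkl : k < arr.length := by omega
    have hget : PySem.List.pyGetD arr (k : Int) 0 = arr[k] := by
      rw [PySem.List.pyGetD_natCast]
      exact List.getD_eq_getElem arr 0 hkl
    have htake : arr.take (k + 1) = arr.take k ++ [arr[k]] := by
      rw [List.take_add_one, List.getElem?_eq_getElem hkl]
      rfl
    rw [htake, List.foldl_append]
    simp only [List.foldl_cons, List.foldl_nil, hget]

lemma foldrR2 {σ : Type} (arr : List Int) (G : Int → σ → σ) :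
    ∀ (m : Nat), m ≤ arr.length → ∀ (init : σ),
    (PySem.List.pyRange 0 (m : Int) 1).foldr (fun i s => G (PySem.List.pyGetD arr i 0) s) init
      = (arr.take m).foldr G init := by
  intro m
  induction m with
  | zero =>
    intro _ init
    rw [show ((0 : Nat) : Int) = 0 from rfl, PySem.List.pyRange_one_eq_nil le_rfl]
    simp
  | succ k ih =>
    intro hm init
    have : ((k + 1 : Nat) : Int) = (k : Int) + 1 := by push_cast; ring
    rw [this, PySem.List.pyRange_one_succ_right (by positivity), List.foldr_append,
        ih (by omega)]
    have hkl : k < arr.length := by omega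
    have hget : PySem.List.pyGetD arr (k : Int) 0 = arr[k] := by
      rw [PySem.List.pyGetD_natCast]
      exact List.getD_eq_getElem arr 0 hkl
    have htake : arr.take (k + 1) = arr.take k ++ [arr[k]] := by
      rw [List.take_add_one, List.getElem?_eq_getElem hkl]
      rfl
    rw [htake, List.foldr_append]
    simp only [List.foldr_cons, List.foldr_nil, hget]

-- ===== VERDICT (by name: the statement is the Claim_ definition above) =====
theorem expensive_phone_spec : Claim_equal_expensive_phone := by
  intro n arr _ hpre
  unfold Spec_expensive_phone expensive_phone expensive_phone_alt
  by_cases hn : n ≤ 0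
  · rw [PySem.List.pyRange_one_eq_nil hn, PySem.List.pyRange_neg_one_eq_nil (by omega)]
    simp
  · push_neg at hn
    have hpre' : n ≤ (arr.length : Int) := hpre
    have hmn : ((n.toNat : Nat) : Int) = n := Int.toNat_of_nonneg (by omega)
    have hml : n.toNat ≤ arr.length := by omega
    set xs := arr.take n.toNat with hxs
    -- A side
    have hA : (PySem.List.pyRange 0 n 1).foldl
        (fun s i => pvStepA s (PySem.List.pyGetD arr i 0)) ([], 0)
        = xs.foldl pvStepA ([], 0) := by
      rw [← hmn]; exact foldlR1 arr pvStepA n.toNat hml ([], 0)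
    -- B side
    have hrev : PySem.List.pyRange (n - 1) (-1) (-1) = (PySem.List.pyRange 0 n 1).reverse := by
      have := PySem.List.pyRange_neg_one_eq_reverse (n - 1) (-1)
      simpa using this
    have hB : (PySem.List.pyRange (n - 1) (-1) (-1)).foldl
        (fun s i => pvStepB s (PySem.List.pyGetD arr i 0)) (0, 0, none)
        = xs.foldr (fun v s => pvStepB s v) (0, 0, none) := by
      rw [hrev, List.foldl_reverse, ← hmn]
      exact foldrR2 arr (fun v s => pvStepB s v) n.toNat hml (0, 0, none)
    rw [hA, hB, foldrB_eq]
    have hcount := foldlA_count xs [] 0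
    have hstack := stackA_eq xs
    simp only [List.length_nil] at hcount
    rw [hstack] at hcount
    simp only []
    omega
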